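-- pv_equiv track=rewrite | github.com/kevtool/calculator | backend/convert.py | to_infix
-- ===== SOURCE A (Python) =====
-- def is_number(string):
--     try:
--         float(string)
--         return True
--     except ValueError:
--         return False
--
-- def to_infix(string):
--     if (string.count("(") != string.count(")")):
--         return "ERROR"
--
--     newstr = ""
--     for index, char in enumerate(string):
--         if (char == "x"):
--             newstr += "*"
--         elif (char == "(" and index < len(string) - 1 and string[index + 1] == ")"):
--             return "ERROR"
--         elif (char.isnumeric() and index < len(string) - 1 and string[index + 1] == "("):
--             newstr += (char + "*")
--         elif (char == ")" and index < len(string) - 1 and (string[index + 1].isnumeric() or string[index + 1] == "(" or string[index+1] == ".")):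
--             newstr += (char + "*")
--         elif (char == "-" and (string[index + 1].isnumeric() or string[index + 1] == "(" or string[index+1] == ".")):
--             newstr += "n"
--         elif (char != " "):
--             newstr += char
--
--     string = ""
--     stack = []
--     for char in newstr:
--
--         if (char == "("):
--             stack.append("")
--         elif (char == ")"):
--             result = stack.pop()
--             if (is_number(result) == False):
--                 result = "(" + result + ")"
--             if (len(stack) > 0):
--                 stack[-1] += result
--             else:
--                 string += result
--         elif (len(stack) > 0):
--             stack[-1] = stack[-1] + char
--         else:
--             string += char
--
--
--     return string
-- ===== SOURCE B (Python) =====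
-- # B: pass (1) is rebuilt back-to-front (reverse walk, so the lookahead is the
-- # previously visited character); pass (2)'s explicit list stack is replaced by
-- # a recursive-descent parser that threads the paren nesting through the call
-- # stack (objective: alternative decomposition, same cost).
--
-- def is_number(string):
--     try:
--         float(string)
--         return True
--     except ValueError:
--         return False
--
--
-- def normalize(chars):
--     # pass (1) built back to front: walking the characters in reverse makes the
--     # lookahead simply the previous character visited; None signals ERROR
--     out = []
--     nxt = None
--     for c in reversed(chars):
--         if c == "x":
--             out.append("*")
--         elif c == "(" and nxt == ")":
--             return None
--         elif c.isnumeric() and nxt == "(":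
--             out.append(c + "*")
--         elif c == ")" and nxt is not None and (nxt.isnumeric() or nxt == "(" or nxt == "."):
--             out.append(c + "*")
--         elif c == "-" and nxt is not None and (nxt.isnumeric() or nxt == "(" or nxt == "."):
--             out.append("n")
--         elif c != " ":
--             out.append(c)
--         nxt = c
--     return "".join(reversed(out))
--
--
-- def parse(s, i):
--     # parse s[i:] until an unmatched ")" (consumed) or the end of s;
--     # returns (text, index after the stopping point)
--     buf = ""
--     while i < len(s):
--         char = s[i]
--         i += 1
--         if char == ")":
--             return buf, i
--         if char == "(":
--             inner, i = parse(s, i)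
--             buf += inner if is_number(inner) else "(" + inner + ")"
--         else:
--             buf += char
--     return buf, i
--
--
-- def to_infix(string):
--     if string.count("(") != string.count(")"):
--         return "ERROR"
--     pre = normalize(list(string))
--     if pre is None:
--         return "ERROR"
--     return parse(pre, 0)[0]
-- ===== Notes on version B (the rewrite author's own statement) =====
-- stated objective: alternative
-- what changed: Pass (1)'s forward indexed-lookahead loop is rebuilt back-to-front (a reverse walk in which the lookahead is the previously visited character), and pass (2)'s explicit list stack is replaced by a recursive-descent parser that threads parenthesis nesting through the call stack.
import Mathlib
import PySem

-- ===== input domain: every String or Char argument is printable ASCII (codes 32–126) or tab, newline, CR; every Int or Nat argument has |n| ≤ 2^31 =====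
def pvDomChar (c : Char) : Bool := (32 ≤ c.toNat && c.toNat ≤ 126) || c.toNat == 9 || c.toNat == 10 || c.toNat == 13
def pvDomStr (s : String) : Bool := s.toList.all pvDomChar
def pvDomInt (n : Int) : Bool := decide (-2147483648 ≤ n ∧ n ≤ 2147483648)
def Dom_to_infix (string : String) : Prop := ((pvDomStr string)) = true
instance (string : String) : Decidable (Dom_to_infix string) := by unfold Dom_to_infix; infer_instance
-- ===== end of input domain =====

-- B rebuilds pass (1) back to front (reverse walk, the lookahead is the previously visited
-- character) and replaces pass (2)'s explicit list stack by a recursive-descent parser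
-- (objective: alternative decomposition, same cost). All string work is on List Char.

-- ===== SHARED HELPER (port of the module helper is_number, called by both Pythons) =====

-- Python float() string grammar, hand-ported step for step (no PySem float primitive exists);
-- exact on the printable-ASCII + tab/newline/CR domain (checked against CPython by fuzzing).
def pvIsWS (c : Char) : Bool := c == ' ' || c == '\t' || c == '\n' || c == '\r' || c == '\x0b' || c == '\x0c'

def pvStrip (l : List Char) : List Char := ((l.dropWhile pvIsWS).reverse.dropWhile pvIsWS).reverse

-- a run of digits in which every '_' sits between two digits (CPython digitpart), after its first digit
def pvDrunAux : List Char → Bool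
  | [] => true
  | c :: r =>
    if PySem.Chars.isdigit c then pvDrunAux r
    else if c == '_' then
      match r with
      | c2 :: r2 => PySem.Chars.isdigit c2 && pvDrunAux r2
      | [] => false
    else false

def pvDrun : List Char → Bool
  | [] => false
  | c :: r => PySem.Chars.isdigit c && pvDrunAux r

-- split at the first character satisfying p: some (before, after)
def pvSplitAt? (p : Char → Bool) : List Char → Option (List Char × List Char)
  | [] => none
  | c :: r => if p c then some ([], r) else (pvSplitAt? p r).map (fun ab => (c :: ab.1, ab.2))

def pvMantOk (m : List Char) : Bool :=
  match pvSplitAt? (· == '.') m with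
  | none => pvDrun m
  | some (ip, fp) =>
    if fp.contains '.' then false
    else (ip.isEmpty || pvDrun ip) && (fp.isEmpty || pvDrun fp) && !(ip.isEmpty && fp.isEmpty)

def pvExpOk (e : List Char) : Bool :=
  pvDrun (match e with
          | c :: r => if c == '+' || c == '-' then r else c :: r
          | [] => [])

-- is_number(string): float(string) succeeds (CPython float-from-string grammar)
def isNumberL (s : List Char) : Bool :=
  let l := pvStrip s
  let l := match l with
           | c :: r => if c == '+' || c == '-' then r else c :: r
           | [] => []
  if l.isEmpty then false
  else if l.map PySem.Chars.lowerChar == "inf".toList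
       || l.map PySem.Chars.lowerChar == "infinity".toList
       || l.map PySem.Chars.lowerChar == "nan".toList then true
  else
    match pvSplitAt? (fun c => c == 'e' || c == 'E') l with
    | none => pvMantOk l
    | some (m, ex) => pvMantOk m && pvExpOk ex

-- ===== PORT A =====

-- one step of A's pass (1): char.isnumeric() = isdigit on the ASCII domain;
-- string[index+1] in the '-' branch raises IndexError at the last index in Python —
-- those inputs are excluded by Pre_ (pyGetD's ' ' default is never decisive inside Pre_)
def preStep (s : List Char) (st : Option (List Char)) (ic : Int × Char) : Option (List Char) :=
  match st with
  | none => none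
  | some newstr =>
    let index := ic.1
    let char := ic.2
    if char == 'x' then some (newstr ++ ['*'])
    else if char == '(' && decide (index < (s.length : Int) - 1) && (PySem.List.pyGetD s (index + 1) ' ' == ')') then none
    else if PySem.Chars.isdigit char && decide (index < (s.length : Int) - 1) && (PySem.List.pyGetD s (index + 1) ' ' == '(') then
      some (newstr ++ [char, '*'])
    else if char == ')' && decide (index < (s.length : Int) - 1) &&
            (PySem.Chars.isdigit (PySem.List.pyGetD s (index + 1) ' ') || PySem.List.pyGetD s (index + 1) ' ' == '(' || PySem.List.pyGetD s (index + 1) ' ' == '.') then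
      some (newstr ++ [char, '*'])
    else if char == '-' &&
            (PySem.Chars.isdigit (PySem.List.pyGetD s (index + 1) ' ') || PySem.List.pyGetD s (index + 1) ' ' == '(' || PySem.List.pyGetD s (index + 1) ' ' == '.') then
      some (newstr ++ ['n'])
    else if char != ' ' then some (newstr ++ [char])
    else some newstr

-- A's pass (1): count guard then the enumerate loop; none = "ERROR"
def preprocess (string : String) : Option (List Char) :=
  if string.toList.count '(' ≠ string.toList.count ')' then none
  else (PySem.List.enumerate string.toList).foldl (preStep string.toList) (some [])

-- one step of A's pass (2): state = (string, stack) with the stack top first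
-- (Python's stack.append/stack.pop()/stack[-1] act on the head here)
def stepA (st : List Char × List (List Char)) (char : Char) : List Char × List (List Char) :=
  let (out, stack) := st
  if char == '(' then (out, [] :: stack)
  else if char == ')' then
    match stack with
    | [] => (out, [])   -- Python raises IndexError (stack.pop() on []); excluded by Pre_
    | top :: rest =>
      let result := if isNumberL top then top else '(' :: top ++ [')']
      match rest with
      | [] => (out ++ result, [])
      | t2 :: r2 => (out, (t2 ++ result) :: r2)
  else
    match stack with
    | t :: r => (out, (t ++ [char]) :: r)
    | [] => (out ++ [char], [])

def to_infix (string : String) : String :=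
  match preprocess string with
  | none => "ERROR"
  | some newstr => String.mk (newstr.foldl stepA ([], [])).1

-- ===== PORT B =====

-- B's pass (1): the reversed(chars) loop of Source B's normalize, as structural recursion over
-- the reversed list; out collects the appended chunks, nxt is the previously visited
-- (= next) character; "".join(reversed(out)) at the end
def normRevB : List Char → List (List Char) → Option Char → Option (List (List Char))
  | [], out, _ => some out
  | c :: rs, out, nxt =>
    if c == 'x' then normRevB rs (out ++ [['*']]) (some c)
    else if c == '(' && nxt == some ')' then none
    else if PySem.Chars.isdigit c && nxt == some '(' then normRevB rs (out ++ [[c, '*']]) (some c)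
    else if c == ')' && (match nxt with | some d => PySem.Chars.isdigit d || d == '(' || d == '.' | none => false) then
      normRevB rs (out ++ [[c, '*']]) (some c)
    else if c == '-' && (match nxt with | some d => PySem.Chars.isdigit d || d == '(' || d == '.' | none => false) then
      normRevB rs (out ++ [['n']]) (some c)
    else if c != ' ' then normRevB rs (out ++ [[c]]) (some c)
    else normRevB rs out (some c)

def normalizeB (chars : List Char) : Option (List Char) :=
  match normRevB chars.reverse [] none with
  | none => none
  | some out => some out.reverse.flatten

-- B's pass (2): parse s until an unmatched ')' (consumed) or the end, accumulating buf;
-- returns (text, rest). fuel (= length of the initial list) only makes the recursion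
-- structural; it is never exhausted when fuel ≥ l.length.
def parseB : Nat → List Char → List Char → List Char × List Char
  | _, [], buf => (buf, [])
  | 0, l, buf => (buf, l)
  | fuel + 1, char :: rest, buf =>
    if char == ')' then (buf, rest)
    else if char == '(' then
      parseB fuel (parseB fuel rest []).2
        (buf ++ (if isNumberL (parseB fuel rest []).1 then (parseB fuel rest []).1
                 else '(' :: (parseB fuel rest []).1 ++ [')']))
    else parseB fuel rest (buf ++ [char])

def to_infix_alt (string : String) : String :=
  if string.toList.count '(' ≠ string.toList.count ')' then "ERROR"
  else match normalizeB string.toList with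
       | none => "ERROR"
       | some pre => String.mk (parseB pre.length pre []).1

-- ===== PRECONDITION & SPEC =====

-- parenthesis surplus of a prefix
def pvDepth (l : List Char) : Int := (l.count '(' : Int) - (l.count ')' : Int)

-- Pre_ excludes exactly the inputs on which A raises IndexError: equal paren counts with
-- no "()" occurrence (A already returned "ERROR" before reaching one) and either a trailing
-- '-' (string[index+1] in pass (1)) or a prefix with more ')' than '(' (stack.pop() on the
-- empty stack in pass (2)).
def Pre_to_infix (string : String) : Prop :=
  string.toList.count '(' = string.toList.count ')' →
    (['(', ')'] <:+: string.toList ∨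
     (string.toList.getLast? ≠ some '-' ∧
      ∀ n < string.toList.length, 0 ≤ pvDepth (string.toList.take n)))
instance (string : String) : Decidable (Pre_to_infix string) := by unfold Pre_to_infix; infer_instance

def pvWitness_to_infix : String := "2x(3+4)"

def Spec_to_infix (string : String) (out : String) : Prop := out = to_infix_alt string
instance (string : String) (out : String) : Decidable (Spec_to_infix string out) := by unfold Spec_to_infix; infer_instance

-- ===== CLAIM (what is proved, stated in full; the proofs are below) =====
def Claim_equal_to_infix : Prop := ∀ (string : String), Dom_to_infix string → Pre_to_infix string → Spec_to_infix string (to_infix string)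

-- ===== LEMMAS AND PROOFS =====

-- the chunk one character contributes in pass (1), as a function of the lookahead character
def headOf (c : Char) (n : Option Char) : Option (List Char) :=
  if c == 'x' then some ['*']
  else if c == '(' && n == some ')' then none
  else if PySem.Chars.isdigit c && n == some '(' then some [c, '*']
  else if c == ')' && (match n with | some d => PySem.Chars.isdigit d || d == '(' || d == '.' | none => false) then some [c, '*']
  else if c == '-' && (match n with | some d => PySem.Chars.isdigit d || d == '(' || d == '.' | none => false) then some ['n']
  else if c != ' ' then some [c] else some []

def nhd (rest : List Char) (t : Option Char) : Option Char :=
  match rest with | [] => t | d :: _ => some d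

-- forward one-pass specification of pass (1), lookahead threaded through nhd
def normFwd : List Char → Option Char → Option (List Char)
  | [], _ => some []
  | c :: rest, t =>
    match headOf c (nhd rest t) with
    | none => none
    | some h => (normFwd rest t).map (h ++ ·)

theorem foldl_preStep_none (s : List Char) (L : List (Int × Char)) :
    L.foldl (preStep s) none = none := by
  induction L with
  | nil => rfl
  | cons p r ih => simpa [preStep] using ih

-- A's step computes headOf of the true lookahead character
theorem preStep_eq_headOf (s : List Char) (k : Nat) (c : Char) (rest a : List Char)
    (hdrop : s.drop k = c :: rest) :
    preStep s (some a) ((k : Int), c) = (headOf c rest.head?).map (a ++ ·) := by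
  have hlen : s.length = k + rest.length + 1 := by
    have h1 := congrArg List.length hdrop
    have h2 : k ≤ s.length := by
      by_contra h
      rw [List.drop_eq_nil_iff.mpr (by omega)] at hdrop
      exact absurd hdrop (by simp)
    simp [List.length_drop] at h1
    omega
  have hrest : s.drop (k + 1) = rest := by
    have : s.drop (k + 1) = (s.drop k).drop 1 := by rw [List.drop_drop]
    rw [this, hdrop]; rfl
  have hget : PySem.List.pyGetD s ((k : Int) + 1) ' ' = rest.head?.getD ' ' := by
    rw [show ((k : Int) + 1) = ((k + 1 : Nat) : Int) by push_cast; ring,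
      PySem.List.pyGetD_natCast, List.getD_eq_getElem?_getD, ← List.head?_drop, hrest]
  cases rest with
  | nil =>
    have hg : decide ((k : Int) < (s.length : Int) - 1) = false := by
      simp at hlen ⊢; omega
    simp only [preStep, headOf, hget, hg]
    simp [nhd, show PySem.Chars.isdigit ' ' = false from by decide]
    split_ifs <;> simp_all
  | cons d rest' =>
    have hg : decide ((k : Int) < (s.length : Int) - 1) = true := by
      simp at hlen ⊢; omega
    simp only [preStep, headOf, hget, hg]
    simp only [List.head?, Option.getD, Bool.and_true, Option.some.injEq]
    by_cases h1 : c = 'x' <;> by_cases h2 : c = '(' <;> by_cases h3 : d = ')' <;>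
      simp [h1, h2, h3] <;> split_ifs <;> simp_all
-- A's whole pass-(1) loop computes normFwd with no trailing lookahead
theorem foldl_preStep_eq_normFwd (s : List Char) :
    ∀ (xs : List Char) (k : Nat) (a : List Char), s.drop k = xs →
    (PySem.List.enumerate xs (k : Int)).foldl (preStep s) (some a) = (normFwd xs none).map (a ++ ·) := by
  intro xs
  induction xs with
  | nil => intro k a _; simp [PySem.List.enumerate_nil, normFwd]
  | cons c rest ih =>
    intro k a hdrop
    rw [PySem.List.enumerate_cons, List.foldl_cons, preStep_eq_headOf s k c rest a hdrop]
    have hrest : s.drop (k + 1) = rest := by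
      have : s.drop (k + 1) = (s.drop k).drop 1 := by rw [List.drop_drop]
      rw [this, hdrop]; rfl
    have hnhd : nhd rest (none : Option Char) = rest.head? := by cases rest <;> rfl
    cases hh : headOf c rest.head? with
    | none =>
      simp only [Option.map_none]
      rw [foldl_preStep_none]
      simp [normFwd, hnhd, hh]
    | some h =>
      simp only [Option.map_some]
      rw [show ((k : Int) + 1) = ((k + 1 : Nat) : Int) by push_cast; ring,
        ih (k + 1) (a ++ h) hrest]
      simp only [normFwd, hnhd, hh]
      cases normFwd rest none <;> simp [List.append_assoc]

theorem nhd_append (ys : List Char) (c : Char) (t : Option Char) :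
    nhd (ys ++ [c]) t = nhd ys (some c) := by cases ys <;> rfl

-- peeling the LAST character off normFwd's argument
theorem normFwd_append (c : Char) : ∀ (ys : List Char) (t : Option Char),
    normFwd (ys ++ [c]) t = (normFwd ys (some c)).bind (fun r => (headOf c t).map (fun h => r ++ h)) := by
  intro ys
  induction ys with
  | nil =>
    intro t
    simp only [List.nil_append, normFwd, nhd]
    cases headOf c t <;> simp
  | cons d ys' ih =>
    intro t
    rw [List.cons_append]
    simp only [normFwd, nhd_append]
    cases headOf d (nhd ys' (some c)) with
    | none => simp
    | some h =>
      simp only [ih t]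
      cases normFwd ys' (some c) <;> cases headOf c t <;> simp [List.append_assoc]

-- B's reverse walk computes normFwd of the reversed (= original) text
theorem normRevB_eq_normFwd : ∀ (xs : List Char) (out : List (List Char)) (nxt : Option Char),
    (normRevB xs out nxt).map (fun o => o.reverse.flatten) =
      (normFwd xs.reverse nxt).map (fun r => r ++ out.reverse.flatten) := by
  intro xs
  induction xs with
  | nil => intro out nxt; simp [normRevB, normFwd]
  | cons c rs ih =>
    intro out nxt
    have hfwd : normFwd ((c :: rs).reverse) nxt =
        (normFwd rs.reverse (some c)).bind (fun r => (headOf c nxt).map (fun h => r ++ h)) := by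
      rw [List.reverse_cons, normFwd_append]
    have hchunk : ∀ (h : List Char),
        headOf c nxt = some h →
        (normRevB rs (out ++ [h]) (some c)).map (fun o => o.reverse.flatten) =
          (normFwd ((c :: rs).reverse) nxt).map (fun r => r ++ out.reverse.flatten) := by
      intro h hh
      rw [ih (out ++ [h]) (some c), hfwd, hh]
      cases normFwd rs.reverse (some c) <;> simp [List.append_assoc]
    simp only [normRevB, headOf] at hchunk ⊢
    split_ifs with h1 h2 h3 h4 h5 h6
    · exact hchunk ['*'] (by split_ifs <;> simp_all)
    · rw [hfwd]
      simp only [headOf]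
      rw [if_neg h1, if_pos h2]
      cases normFwd rs.reverse (some c) <;> simp
    · exact hchunk [c, '*'] (by split_ifs <;> simp_all)
    · exact hchunk [c, '*'] (by split_ifs <;> simp_all)
    · exact hchunk ['n'] (by split_ifs <;> simp_all)
    · exact hchunk [c] (by split_ifs <;> simp_all)
    · have hh : headOf c nxt = some [] := by simp only [headOf]; split_ifs <;> simp_all
      rw [ih out (some c), hfwd, hh]
      cases normFwd rs.reverse (some c) <;> simp

theorem normalizeB_eq_normFwd (l : List Char) : normalizeB l = normFwd l none := by
  have h := normRevB_eq_normFwd l.reverse [] none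
  rw [List.reverse_reverse] at h
  unfold normalizeB
  cases hr : normRevB l.reverse [] none with
  | none =>
    rw [hr] at h
    cases hf : normFwd l none <;> rw [hf] at h <;> simp_all
  | some out =>
    rw [hr] at h
    cases hf : normFwd l none <;> rw [hf] at h <;> simp_all

theorem preprocess_eq_normFwd (string : String)
    (hc : string.toList.count '(' = string.toList.count ')') :
    preprocess string = normFwd string.toList none := by
  rw [preprocess, if_neg (by omega),
    show PySem.List.enumerate string.toList = PySem.List.enumerate string.toList ((0 : Nat) : Int) by norm_num,
    foldl_preStep_eq_normFwd string.toList string.toList 0 [] (by simp)]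
  cases normFwd string.toList none <;> simp

-- a "()" occurrence makes pass (1) fail on both sides
theorem normFwd_infix_none : ∀ (a : List Char) (b : List Char) (t : Option Char),
    normFwd (a ++ '(' :: ')' :: b) t = none := by
  intro a
  induction a with
  | nil => intro b t; simp [normFwd, nhd, headOf]
  | cons x a' ih =>
    intro b t
    rw [List.cons_append]
    simp only [normFwd]
    cases headOf x (nhd (a' ++ '(' :: ')' :: b) t) <;> simp [ih]

-- ===== pass (2): balance machinery (for A's stack fold vs B's recursive descent) =====

def Bal (l : List Char) : Prop := (∀ n, 0 ≤ pvDepth (l.take n)) ∧ pvDepth l = 0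

theorem pvDepth_nil : pvDepth [] = 0 := by simp [pvDepth]

theorem pvDepth_append (a b : List Char) : pvDepth (a ++ b) = pvDepth a + pvDepth b := by
  simp [pvDepth, List.count_append]; ring

theorem pvDepth_single (c : Char) :
    pvDepth [c] = if c = '(' then 1 else if c = ')' then -1 else 0 := by
  by_cases h1 : c = '(' <;> by_cases h2 : c = ')' <;> simp_all [pvDepth]

theorem pvDepth_cons (c : Char) (l : List Char) : pvDepth (c :: l) = pvDepth [c] + pvDepth l := by
  simpa using pvDepth_append [c] l

theorem pvDepth_single_of {c : Char} (h1 : c ≠ '(') (h2 : c ≠ ')') : pvDepth [c] = 0 := by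
  simp [pvDepth_single, h1, h2]

theorem pvDepth_pair (x y : Char) : pvDepth [x, y] = pvDepth [x] + pvDepth [y] := by
  simpa using pvDepth_append [x] [y]

-- each pass-(1) step appends a chunk with the paren surplus of its input character
theorem preStep_chunk (s : List Char) (i : Int) (c : Char) (a : List Char) :
    preStep s (some a) (i, c) = none ∨
    ∃ ch, preStep s (some a) (i, c) = some (a ++ ch) ∧ pvDepth ch = pvDepth [c] ∧
      ∀ m, min 0 (pvDepth [c]) ≤ pvDepth (ch.take m) := by
  unfold preStep
  simp only
  split_ifs with h1 h2 h3 h4 h5 h6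
  · right
    have hc : c = 'x' := by simpa using h1
    subst hc
    refine ⟨['*'], rfl, by decide, ?_⟩
    intro m; rcases m with _ | _ | m <;> simp [pvDepth] <;> decide
  · exact Or.inl rfl
  · right
    have hd : PySem.Chars.isdigit c = true := by
      simp only [Bool.and_eq_true] at h3; exact h3.1.1
    have hcp : c ≠ '(' := by rintro rfl; exact absurd hd (by decide)
    have hcq : c ≠ ')' := by rintro rfl; exact absurd hd (by decide)
    have hd0 : pvDepth [c] = 0 := pvDepth_single_of hcp hcq
    refine ⟨[c, '*'], rfl, by rw [pvDepth_pair, hd0]; decide, ?_⟩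
    intro m
    rcases m with _ | _ | _ | m
    · simp [pvDepth, hd0]
    · simp [hd0]
    · simp [pvDepth_pair, hd0]; decide
    · simp [pvDepth_pair, hd0]; decide
  · right
    have hc : c = ')' := by
      simp only [Bool.and_eq_true] at h4; simpa using h4.1.1
    subst hc
    refine ⟨[')', '*'], rfl, by decide, ?_⟩
    intro m
    rcases m with _ | _ | _ | m <;> simp [pvDepth_pair, pvDepth_single, pvDepth] <;> decide
  · right
    have hc : c = '-' := by
      simp only [Bool.and_eq_true] at h5; simpa using h5.1
    subst hc
    refine ⟨['n'], rfl, by decide, ?_⟩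
    intro m; rcases m with _ | _ | m <;> simp [pvDepth] <;> decide
  · right
    refine ⟨[c], rfl, rfl, ?_⟩
    intro m
    rcases m with _ | m
    · simpa [pvDepth] using min_le_left 0 (pvDepth [c])
    · simpa using min_le_right 0 (pvDepth [c])
  · right
    have hc : c = ' ' := by simpa using h6
    subst hc
    refine ⟨[], by simp, by decide, ?_⟩
    intro m; simpa [pvDepth] using min_le_left 0 (pvDepth [' '])

-- pass (1) preserves prefix balance and the total surplus
theorem pre_inv (s : List Char) (hs : ∀ n, 0 ≤ pvDepth (s.take n)) :
    ∀ (xs : List Char) (k : Nat) (a : List Char), s.drop k = xs →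
    (∀ n, 0 ≤ pvDepth (a.take n)) → pvDepth a = pvDepth (s.take k) →
    ∀ ns, (PySem.List.enumerate xs (k : Int)).foldl (preStep s) (some a) = some ns →
    (∀ n, 0 ≤ pvDepth (ns.take n)) ∧ pvDepth ns = pvDepth s := by
  intro xs
  induction xs with
  | nil =>
    intro k a hdrop hpref hdep ns hfold
    rw [PySem.List.enumerate_nil, List.foldl_nil] at hfold
    obtain rfl : a = ns := Option.some.inj hfold
    have hk : s.length ≤ k := List.drop_eq_nil_iff.mp hdrop
    rw [List.take_of_length_le hk] at hdep
    exact ⟨hpref, hdep⟩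
  | cons c xs' ih =>
    intro k a hdrop hpref hdep ns hfold
    rw [PySem.List.enumerate_cons, List.foldl_cons] at hfold
    have hk : k < s.length := by
      have := congrArg List.length hdrop
      simp [List.length_drop] at this
      omega
    have hck : s[k]? = some c := by
      have h0 : (s.drop k)[0]? = s[k + 0]? := List.getElem?_drop
      rw [hdrop] at h0
      simpa using h0.symm
    have htake : s.take (k + 1) = s.take k ++ [c] := by
      rw [List.take_succ, hck]
      rfl
    have htk : pvDepth (s.take (k + 1)) = pvDepth (s.take k) + pvDepth [c] := by
      rw [htake, pvDepth_append]
    rcases preStep_chunk s (k : Int) c a with hnone | ⟨ch, heq, hchd, hchp⟩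
    · rw [hnone, foldl_preStep_none] at hfold
      exact absurd hfold (by simp)
    · rw [heq] at hfold
      rw [show ((k : Int) + 1) = ((k + 1 : Nat) : Int) by push_cast; ring] at hfold
      refine ih (k + 1) (a ++ ch) ?_ ?_ ?_ ns hfold
      · have h2 : s.drop (k + 1) = (s.drop k).drop 1 := by
          rw [List.drop_drop]
        rw [h2, hdrop]
        rfl
      · intro n
        rw [List.take_append, pvDepth_append]
        have h1 := hpref n
        have h2 := hchp (n - a.length)
        have h3 := hs k
        have h4 := hs (k + 1)
        rcases Nat.le_total n a.length with hn | hn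
        · rw [Nat.sub_eq_zero_of_le hn, List.take_zero, pvDepth_nil]
          omega
        · rw [List.take_of_length_le hn, hdep]
          rcases le_total 0 (pvDepth [c]) with hm | hm
          · rw [min_eq_left hm] at h2
            omega
          · rw [min_eq_right hm] at h2
            omega
      · rw [pvDepth_append, hdep, hchd, htk]

theorem parseB_rem_le : ∀ (f : Nat) (l buf : List Char), (parseB f l buf).2.length ≤ l.length := by
  intro f
  induction f with
  | zero => intro l buf; cases l <;> simp [parseB]
  | succ f ih =>
    intro l buf
    cases l with
    | nil => simp [parseB]
    | cons c rest =>
      by_cases h1 : (c == ')') = true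
      · simp [parseB, h1]
      · by_cases h2 : (c == '(') = true
        · simp only [parseB]
          rw [if_neg h1, if_pos h2]
          exact le_trans (ih _ _) (le_trans (ih _ _) (by simp))
        · simp only [parseB]
          rw [if_neg h1, if_neg h2]
          exact le_trans (ih _ _) (by simp)

theorem parseB_fuel_irrel : ∀ (f g : Nat) (l buf : List Char),
    l.length ≤ f → l.length ≤ g → parseB f l buf = parseB g l buf := by
  intro f
  induction f with
  | zero =>
    intro g l buf h1 _
    have : l = [] := by cases l <;> simp_all
    subst this; cases g <;> rfl
  | succ f ih =>
    intro g l buf h1 h2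
    cases l with
    | nil => cases g <;> rfl
    | cons c rest =>
      cases g with
      | zero => simp at h2
      | succ g =>
        have hrf : rest.length ≤ f := by simp at h1; omega
        have hrg : rest.length ≤ g := by simp at h2; omega
        by_cases hc1 : (c == ')') = true
        · simp [parseB, hc1]
        · by_cases hc2 : (c == '(') = true
          · simp only [parseB]
            rw [if_neg hc1, if_pos hc2, if_neg hc1, if_pos hc2, ih g rest [] hrf hrg]
            exact ih g _ _ ((parseB_rem_le g rest []).trans hrf) ((parseB_rem_le g rest []).trans hrg)
          · simp only [parseB]
            rw [if_neg hc1, if_neg hc2, if_neg hc1, if_neg hc2]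
            exact ih g rest (buf ++ [c]) hrf hrg

-- Dyck decomposition of a balanced string starting with '('
theorem dyck {l : List Char} (h : Bal ('(' :: l)) :
    ∃ m r, l = m ++ ')' :: r ∧ Bal m ∧ Bal r := by
  obtain ⟨hpre, htot⟩ := h
  have hdp : pvDepth ['('] = 1 := by decide
  have hneg1 : ∀ n, -1 ≤ pvDepth (l.take n) := by
    intro n
    have h1 := hpre (n + 1)
    rw [List.take_succ_cons, pvDepth_cons, hdp] at h1
    omega
  have htl : pvDepth l = -1 := by
    rw [pvDepth_cons, hdp] at htot; omega
  have hex : ∃ n, pvDepth (l.take n) = -1 := ⟨l.length, by rw [List.take_length]; exact htl⟩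
  have hk := Nat.find_spec hex
  set k := Nat.find hex with hkdef
  have hkpos : 0 < k := by
    rcases Nat.eq_zero_or_pos k with h0 | h
    · rw [h0, List.take_zero] at hk
      exact absurd hk (by decide)
    · exact h
  have hkle : k ≤ l.length := Nat.find_le (by rw [List.take_length]; exact htl)
  have hnn : ∀ j, j < k → 0 ≤ pvDepth (l.take j) := by
    intro j hj
    have h1 : ¬ (pvDepth (l.take j) = -1) := Nat.find_min hex hj
    have h2 := hneg1 j
    omega
  have hlt : k - 1 < l.length := by omega
  have htakek : l.take k = l.take (k - 1) ++ [l[k - 1]'hlt] := by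
    conv_lhs => rw [show k = (k - 1) + 1 by omega]
    rw [List.take_succ, List.getElem?_eq_getElem hlt]
    rfl
  have hprev := hnn (k - 1) (by omega)
  have hch : pvDepth (l.take (k - 1)) + pvDepth [l[k - 1]'hlt] = -1 := by
    rw [← pvDepth_append, ← htakek]
    exact hk
  have hcr : l[k - 1]'hlt = ')' ∧ pvDepth (l.take (k - 1)) = 0 := by
    have hsing := pvDepth_single (l[k - 1]'hlt)
    by_cases hc1 : l[k - 1]'hlt = '('
    · rw [if_pos hc1] at hsing; omega
    · by_cases hc2 : l[k - 1]'hlt = ')'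
      · rw [if_neg hc1, if_pos hc2] at hsing
        exact ⟨hc2, by omega⟩
      · rw [if_neg hc1, if_neg hc2] at hsing; omega
  refine ⟨l.take (k - 1), l.drop k, ?_, ⟨?_, hcr.2⟩, ⟨?_, ?_⟩⟩
  · conv_lhs => rw [← List.take_append_drop k l]
    rw [htakek, hcr.1]
    simp
  · intro n
    rw [List.take_take]
    exact hnn (min n (k - 1)) (by omega)
  · intro n
    have h1 := hneg1 (k + n)
    rw [List.take_add, pvDepth_append, hk] at h1
    omega
  · have h1 := congrArg pvDepth (List.take_append_drop k l)
    rw [pvDepth_append, hk, htl] at h1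
    omega

theorem stepA_open (out : List Char) (stack : List (List Char)) :
    stepA (out, stack) '(' = (out, [] :: stack) := by simp [stepA]

theorem stepA_close2 (out top t2 : List Char) (r2 : List (List Char)) :
    stepA (out, top :: t2 :: r2) ')' =
      (out, (t2 ++ (if isNumberL top then top else '(' :: top ++ [')'])) :: r2) := by
  simp [stepA]

theorem stepA_close1 (out top : List Char) :
    stepA (out, [top]) ')' = (out ++ (if isNumberL top then top else '(' :: top ++ [')']), []) := by
  simp [stepA]

theorem stepA_other_cons {c : Char} (h1 : c ≠ '(') (h2 : c ≠ ')') (out t : List Char)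
    (r : List (List Char)) : stepA (out, t :: r) c = (out, (t ++ [c]) :: r) := by
  simp [stepA, h1, h2]

theorem stepA_other_nil {c : Char} (h1 : c ≠ '(') (h2 : c ≠ ')') (out : List Char) :
    stepA (out, []) c = (out ++ [c], []) := by
  simp [stepA, h1, h2]

theorem pass2_nil :
    ((∀ buf, (parseB ([] : List Char).length [] buf).2 = ([] : List Char))
    ∧ (∀ buf out stack, ([] : List Char).foldl stepA (out, buf :: stack) = (out, (parseB ([] : List Char).length [] buf).1 :: stack))
    ∧ (∀ out, ([] : List Char).foldl stepA (out, []) = ((parseB ([] : List Char).length [] out).1, ([] : List (List Char))))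
    ∧ (∀ t r, parseB (([] : List Char) ++ ')' :: r).length (([] : List Char) ++ ')' :: r) t = ((parseB ([] : List Char).length [] t).1, r))) := by
  refine ⟨fun buf => rfl, fun buf out stack => rfl, fun out => rfl, fun t r => ?_⟩
  simp [parseB]

-- the main package: on balanced input, A's stack fold computes B's parse
theorem pass2_main : ∀ (N : Nat) (l : List Char), l.length ≤ N → Bal l →
    ((∀ buf, (parseB l.length l buf).2 = ([] : List Char))
    ∧ (∀ buf out stack, l.foldl stepA (out, buf :: stack) = (out, (parseB l.length l buf).1 :: stack))
    ∧ (∀ out, l.foldl stepA (out, []) = ((parseB l.length l out).1, ([] : List (List Char))))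
    ∧ (∀ t r, parseB (l ++ ')' :: r).length (l ++ ')' :: r) t = ((parseB l.length l t).1, r))) := by
  intro N
  induction N with
  | zero =>
    intro l hl _
    obtain rfl : l = [] := by cases l <;> simp_all
    exact pass2_nil
  | succ N ih =>
    intro l hl hbal
    cases l with
    | nil => exact pass2_nil
    | cons char rest =>
      have hcharne : char ≠ ')' := by
        intro hchar
        have h1 := hbal.1 1
        rw [List.take_succ_cons, List.take_zero, hchar,
          show pvDepth [')'] = -1 from by decide] at h1
        omega
      by_cases hpar : char = '('
      · subst hpar
        obtain ⟨m, r, hrest, balm, balr⟩ := dyck hbal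
        subst hrest
        have hml : m.length ≤ N := by simp [List.length_append] at hl; omega
        have hrl : r.length ≤ N := by simp [List.length_append] at hl; omega
        obtain ⟨S2m, S3m, S4m, S5m⟩ := ih m hml balm
        obtain ⟨S2r, S3r, S4r, S5r⟩ := ih r hrl balr
        have hstep : ∀ (R : List Char) (f : Nat) (buf : List Char), (m ++ ')' :: R).length ≤ f →
            parseB (f + 1) ('(' :: (m ++ ')' :: R)) buf =
            parseB f R (buf ++ (if isNumberL (parseB m.length m []).1 then (parseB m.length m []).1
              else '(' :: (parseB m.length m []).1 ++ [')'])) := by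
          intro R f buf hf
          simp only [parseB]
          rw [if_neg (by decide), if_pos (by decide)]
          rw [parseB_fuel_irrel f (m ++ ')' :: R).length (m ++ ')' :: R) [] hf le_rfl, S5m]
        have hcanon : ∀ buf, parseB ('(' :: (m ++ ')' :: r)).length ('(' :: (m ++ ')' :: r)) buf =
            parseB r.length r (buf ++ (if isNumberL (parseB m.length m []).1 then (parseB m.length m []).1
              else '(' :: (parseB m.length m []).1 ++ [')'])) := by
          intro buf
          rw [show ('(' :: (m ++ ')' :: r)).length = (m ++ ')' :: r).length + 1 from rfl,
            hstep r (m ++ ')' :: r).length buf le_rfl]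
          exact parseB_fuel_irrel _ _ _ _ (by simp; omega) le_rfl
        refine ⟨?_, ?_, ?_, ?_⟩
        · intro buf
          rw [hcanon buf, S2r]
        · intro buf out stack
          rw [List.foldl_cons, stepA_open, List.foldl_append, S3m, List.foldl_cons,
            stepA_close2, S3r, hcanon buf]
        · intro out
          rw [List.foldl_cons, stepA_open, List.foldl_append, S3m, List.foldl_cons,
            stepA_close1, S4r, hcanon out]
        · intro t rr
          rw [show ('(' :: (m ++ ')' :: r)) ++ ')' :: rr = '(' :: (m ++ ')' :: (r ++ ')' :: rr)) by simp,
            show ('(' :: (m ++ ')' :: (r ++ ')' :: rr))).length = (m ++ ')' :: (r ++ ')' :: rr)).length + 1 from rfl,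
            hstep (r ++ ')' :: rr) (m ++ ')' :: (r ++ ')' :: rr)).length t le_rfl,
            parseB_fuel_irrel (m ++ ')' :: (r ++ ')' :: rr)).length (r ++ ')' :: rr).length
              (r ++ ')' :: rr) _ (by simp; omega) le_rfl,
            S5r, hcanon t]
      · have hd0 : pvDepth [char] = 0 := pvDepth_single_of hpar hcharne
        have hbalrest : Bal rest := by
          obtain ⟨hp, ht⟩ := hbal
          constructor
          · intro n
            have h1 := hp (n + 1)
            rw [List.take_succ_cons, pvDepth_cons, hd0] at h1
            omega
          · rw [pvDepth_cons, hd0] at ht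
            omega
        obtain ⟨S2s, S3s, S4s, S5s⟩ := ih rest (by simp at hl; omega) hbalrest
        have hstep : ∀ (R : List Char) (f : Nat) (buf : List Char),
            parseB (f + 1) (char :: R) buf = parseB f R (buf ++ [char]) := by
          intro R f buf
          simp only [parseB]
          rw [if_neg (by simp [hcharne]), if_neg (by simp [hpar])]
        refine ⟨?_, ?_, ?_, ?_⟩
        · intro buf
          rw [show (char :: rest).length = rest.length + 1 from rfl, hstep, S2s]
        · intro buf out stack
          rw [List.foldl_cons, stepA_other_cons hpar hcharne, S3s,
            show (char :: rest).length = rest.length + 1 from rfl, hstep]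
        · intro out
          rw [List.foldl_cons, stepA_other_nil hpar hcharne, S4s,
            show (char :: rest).length = rest.length + 1 from rfl, hstep]
        · intro t rr
          rw [show (char :: rest) ++ ')' :: rr = char :: (rest ++ ')' :: rr) by simp,
            show (char :: (rest ++ ')' :: rr)).length = (rest ++ ')' :: rr).length + 1 from rfl,
            hstep (rest ++ ')' :: rr), S5s,
            show (char :: rest).length = rest.length + 1 from rfl, hstep rest]

-- ===== VERDICT (by name: the statement is the Claim_ definition above) =====
theorem to_infix_spec : Claim_equal_to_infix := by
  intro string _hdom hpre
  unfold Spec_to_infix to_infix to_infix_alt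
  by_cases hc : string.toList.count '(' = string.toList.count ')'
  case neg =>
    rw [if_pos (by omega)]
    have : preprocess string = none := by rw [preprocess, if_pos (by omega)]
    rw [this]
  case pos =>
    rw [if_neg (by omega), preprocess_eq_normFwd string hc, normalizeB_eq_normFwd]
    rcases hpre hc with hinf | ⟨-, hprefB⟩
    · obtain ⟨a, b, hab⟩ := hinf
      rw [show string.toList = a ++ '(' :: ')' :: b by rw [← hab]; simp,
        normFwd_infix_none]
    · cases hns : normFwd string.toList none with
      | none => rfl
      | some ns =>
        have hfold : (PySem.List.enumerate string.toList ((0 : Nat) : Int)).foldl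
            (preStep string.toList) (some []) = some ns := by
          rw [foldl_preStep_eq_normFwd string.toList string.toList 0 [] (by simp), hns]
          simp
        have htot : pvDepth string.toList = 0 := by simp [pvDepth, hc]
        have hs : ∀ n, 0 ≤ pvDepth (string.toList.take n) := by
          intro n
          rcases lt_or_ge n string.toList.length with hn | hn
          · exact hprefB n hn
          · rw [List.take_of_length_le hn]; omega
        have hbal : Bal ns := by
          obtain ⟨h1, h2⟩ := pre_inv string.toList hs string.toList 0 [] (by simp)
            (by intro n; simp [pvDepth_nil]) (by simp [pvDepth_nil]) ns hfold
          exact ⟨h1, by omega⟩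
        obtain ⟨-, -, hS4, -⟩ := pass2_main ns.length ns le_rfl hbal
        simp [hS4 []]
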